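-- pv_equiv track=rewrite | github.com/corneliag08/program_22 | Untitled-1.py | cinci_multipli_comuni
-- ===== SOURCE A (Python) =====
-- def cinci_multipli_comuni(x,y):
--     c_m_m_m=[]
--     if x>y:
--         multiplu=x
--     elif y>x:
--         multiplu=y
--     else:
--         multiplu=x
--     while len(c_m_m_m)<5:
--         if ((multiplu%x==0)and(multiplu%y==0)):
--             c_m_m_m.append(multiplu)
--             multiplu +=1
--         else:
--             multiplu +=1
--     return (c_m_m_m)
-- ===== SOURCE B (Python) =====
-- def cinci_multipli_comuni(x, y):
--     a, b = abs(x), abs(y)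
--     while b:
--         a, b = b, a % b
--     lcm = abs(x * y) // a
--     start = -((-max(x, y)) // lcm) * lcm
--     return [start + i * lcm for i in range(5)]
-- ===== Notes on version B (the rewrite author's own statement) =====
-- stated objective: faster
-- what changed: Replaces the unit-step trial scan from max(x,y) (O(lcm) iterations) by Euclid's gcd, the closed-form lcm = |x*y|/gcd, a ceiling-division start, and a direct 5-element arithmetic progression.
-- outside the precondition, e.g. on cinci_multipli_comuni(0, 3): A raises ZeroDivisionError, B raises ZeroDivisionError
import Mathlib
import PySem

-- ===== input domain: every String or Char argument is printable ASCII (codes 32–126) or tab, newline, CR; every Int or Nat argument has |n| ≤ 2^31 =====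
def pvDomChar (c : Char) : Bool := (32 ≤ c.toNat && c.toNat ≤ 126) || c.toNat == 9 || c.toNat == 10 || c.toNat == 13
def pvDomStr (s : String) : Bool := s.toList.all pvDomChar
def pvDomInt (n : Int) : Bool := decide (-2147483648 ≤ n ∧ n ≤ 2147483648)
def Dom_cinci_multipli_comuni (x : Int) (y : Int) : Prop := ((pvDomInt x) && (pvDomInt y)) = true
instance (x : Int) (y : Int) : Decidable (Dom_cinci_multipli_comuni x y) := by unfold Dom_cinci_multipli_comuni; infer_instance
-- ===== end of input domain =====

-- B replaces A's unit-step scan (O(lcm) iterations) by Euclid's gcd, lcm = |x*y|/gcd and a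
-- direct 5-term arithmetic progression (objective: faster, asymptotically).

-- ===== PORT A =====
-- the while loop, made total with fuel (enough fuel is supplied below; the proof shows it never runs out)
def pvLoopA (x y : Int) : List Int → Int → Nat → List Int
  | c, _, 0 => c
  | c, multiplu, fuel+1 =>
    if c.length < 5 then
      if PySem.Int.mod multiplu x = 0 ∧ PySem.Int.mod multiplu y = 0 then
        pvLoopA x y (c ++ [multiplu]) (multiplu + 1) fuel
      else
        pvLoopA x y c (multiplu + 1) fuel
    else c

def cinci_multipli_comuni (x : Int) (y : Int) : List Int :=
  let multiplu : Int := if x > y then x else if y > x then y else x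
  pvLoopA x y [] multiplu (5 * (x * y).natAbs + 1)

-- ===== PORT B =====
-- the while-Euclid loop of Source B
def pvGcdLoop (a b : Int) : Int :=
  if h : b = 0 then a
  else pvGcdLoop b (PySem.Int.mod a b)
termination_by b.natAbs
decreasing_by
  rcases lt_or_gt_of_ne h with hb | hb
  · have h1 := (PySem.Int.mod_neg_bounds a hb).1
    have h2 := (PySem.Int.mod_neg_bounds a hb).2
    omega
  · have h1 := PySem.Int.mod_nonneg a hb
    have h2 := PySem.Int.mod_lt a hb
    omega

def cinci_multipli_comuni_alt (x : Int) (y : Int) : List Int :=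
  let g := pvGcdLoop |x| |y|
  let lcm := PySem.Int.floordiv |x * y| g
  let start := -(PySem.Int.floordiv (-(max x y)) lcm) * lcm
  (PySem.List.pyRange 0 5 1).map (fun i => start + i * lcm)

-- ===== PRECONDITION & SPEC =====
-- Pre_ excludes x = 0 or y = 0, on which A's 'multiplu % x' / 'multiplu % y' raises ZeroDivisionError
def Pre_cinci_multipli_comuni (x : Int) (y : Int) : Prop := x ≠ 0 ∧ y ≠ 0
instance (x : Int) (y : Int) : Decidable (Pre_cinci_multipli_comuni x y) := by
  unfold Pre_cinci_multipli_comuni; infer_instance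
def pvWitness_cinci_multipli_comuni : Int × Int := (2, 3)

def Spec_cinci_multipli_comuni (x : Int) (y : Int) (out : List Int) : Prop := out = cinci_multipli_comuni_alt x y
instance (x : Int) (y : Int) (out : List Int) : Decidable (Spec_cinci_multipli_comuni x y out) := by unfold Spec_cinci_multipli_comuni; infer_instance

-- ===== CLAIM (what is proved, stated in full; the proofs are below) =====
def Claim_equal_cinci_multipli_comuni : Prop := ∀ (x : Int) (y : Int), Dom_cinci_multipli_comuni x y → Pre_cinci_multipli_comuni x y → Spec_cinci_multipli_comuni x y (cinci_multipli_comuni x y)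

-- ===== LEMMAS AND PROOFS =====

-- smallest multiple of L that is ≥ m (ceiling division), for 0 < L
def pvS (L m : Int) : Int := -(PySem.Int.floordiv (-m) L) * L

lemma pvS_char (L m : Int) (hL : 0 < L) :
    L ∣ pvS L m ∧ m ≤ pvS L m ∧ pvS L m < m + L := by
  have h := (PySem.Int.neg_floordiv_neg_eq_iff_of_pos
      (a := m) (b := L) (q := -(PySem.Int.floordiv (-m) L)) hL).mp rfl
  refine ⟨dvd_mul_left L _, h.2, ?_⟩
  have := h.1
  unfold pvS
  nlinarith [h.1]

lemma pvS_unique (L m t : Int) (hL : 0 < L) (h1 : L ∣ t) (h2 : m ≤ t) (h3 : t < m + L) :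
    t = pvS L m := by
  obtain ⟨hd, hs2, hs3⟩ := pvS_char L m hL
  by_contra hne
  have hdd : L ∣ (t - pvS L m) := dvd_sub h1 hd
  have habs : L ∣ |t - pvS L m| := (dvd_abs _ _).mpr hdd
  have hpos : 0 < |t - pvS L m| := abs_pos.mpr (sub_ne_zero.mpr hne)
  have hle := Int.le_of_dvd hpos habs
  have hlt : |t - pvS L m| < L := abs_lt.mpr ⟨by linarith, by linarith⟩
  linarith

lemma pvLoopA_done (x y : Int) (c : List Int) (m : Int) (fuel : Nat) (h : ¬ c.length < 5) :
    pvLoopA x y c m fuel = c := by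
  cases fuel <;> simp [pvLoopA, h]

lemma pvLoopA_spec (x y : Int) (hx : x ≠ 0) (hy : y ≠ 0) :
    ∀ (fuel : Nat) (m : Int) (c : List Int), c.length < 5 →
      (pvS (Int.lcm x y) m + (4 - (c.length : Int)) * (Int.lcm x y) - m).toNat < fuel →
      pvLoopA x y c m fuel =
        c ++ (List.range (5 - c.length)).map (fun i : Nat => pvS (Int.lcm x y) m + (i : Int) * (Int.lcm x y)) := by
  have hL : 0 < (Int.lcm x y : Int) := by
    have : Int.lcm x y ≠ 0 := by
      rw [Int.lcm_def]
      exact Nat.lcm_ne_zero (Int.natAbs_ne_zero.mpr hx) (Int.natAbs_ne_zero.mpr hy)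
    exact_mod_cast Nat.pos_of_ne_zero this
  set L : Int := (Int.lcm x y : Int) with hLdef
  intro fuel
  induction fuel with
  | zero => intro m c hc hf; omega
  | succ fuel ih =>
    intro m c hc hf
    have hdvd_iff : (PySem.Int.mod m x = 0 ∧ PySem.Int.mod m y = 0) ↔ L ∣ m := by
      rw [PySem.Int.mod_eq_zero_iff_dvd, PySem.Int.mod_eq_zero_iff_dvd, hLdef]
      constructor
      · rintro ⟨h1, h2⟩
        rw [← Int.dvd_natAbs, Int.natCast_dvd_natCast, Int.lcm_def]
        exact Nat.lcm_dvd (by rwa [← Int.natAbs_dvd_natAbs] at h1)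
          (by rwa [← Int.natAbs_dvd_natAbs] at h2)
      · intro h
        exact ⟨dvd_trans (Int.dvd_lcm_left x y) h, dvd_trans (Int.dvd_lcm_right x y) h⟩
    obtain ⟨hsd, hs2, hs3⟩ := pvS_char L m hL
    simp only [pvLoopA, if_pos hc]
    by_cases hm : L ∣ m
    · rw [if_pos (hdvd_iff.mpr hm)]
      have hsm : pvS L m = m := (pvS_unique L m m hL hm le_rfl (by linarith)).symm
      by_cases h4 : c.length = 4
      · rw [pvLoopA_done x y _ _ _ (by simp [h4])]
        have h1 : 5 - c.length = 1 := by omega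
        simp [h1, hsm]
      · have hc' : (c ++ [m]).length < 5 := by simp; omega
        have hs1 : pvS L (m + 1) = m + L :=
          (pvS_unique L (m + 1) (m + L) hL (by exact dvd_add hm dvd_rfl)
            (by linarith) (by linarith)).symm
        have hkL : 1 ≤ (4 - (c.length : Int)) * L := by
          have h0 : (1 : Int) ≤ 4 - (c.length : Int) := by
            have : c.length ≤ 3 := by omega
            push_cast; omega
          nlinarith
        have e1 : pvS L m + (4 - (c.length : Int)) * L - m = (4 - (c.length : Int)) * L := by
          rw [hsm]; ring
        have e2 : pvS L (m + 1) + (4 - ((c ++ [m]).length : Int)) * L - (m + 1)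
            = (4 - (c.length : Int)) * L - 1 := by
          rw [hs1]; simp; push_cast; ring
        rw [ih (m + 1) (c ++ [m]) hc' (by rw [e2]; rw [e1] at hf; omega)]
        rw [List.append_assoc]
        congr 1
        have h5 : 5 - c.length = (5 - (c ++ [m]).length) + 1 := by simp; omega
        rw [h5, List.range_succ_eq_map, List.map_cons, List.map_map]
        simp only [List.singleton_append, Nat.cast_zero, List.cons.injEq]
        constructor
        · rw [hsm]; ring
        · apply List.map_congr_left
          intro i _
          simp [Function.comp, hsm, hs1]
          push_cast
          ring
    · rw [if_neg (fun hcon => hm (hdvd_iff.mp hcon))]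
      have hne : pvS L m ≠ m := fun he => hm (he ▸ hsd)
      have hge : m + 1 ≤ pvS L m := by
        rcases lt_or_eq_of_le hs2 with h | h
        · omega
        · exact absurd h.symm hne
      have hs' : pvS L (m + 1) = pvS L m :=
        (pvS_unique L (m + 1) (pvS L m) hL hsd hge (by linarith)).symm
      have hf' : (pvS L (m + 1) + (4 - (c.length : Int)) * L - (m + 1)).toNat < fuel := by
        rw [hs']
        have h0 : 0 ≤ (4 - (c.length : Int)) * L := by
          have : (0 : Int) ≤ 4 - (c.length : Int) := by push_cast; omega
          positivity
        omega
      rw [ih (m + 1) c hc hf', hs']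

lemma pvGcdLoop_eq_gcd : ∀ (n : Nat) (a b : Int), b.natAbs ≤ n → 0 ≤ a → 0 ≤ b →
    pvGcdLoop a b = ((Nat.gcd a.toNat b.toNat : Nat) : Int) := by
  intro n
  induction n with
  | zero =>
    intro a b hn ha hb
    have hb0 : b = 0 := by omega
    subst hb0
    rw [pvGcdLoop]
    simp [Int.toNat_of_nonneg ha]
  | succ n ih =>
    intro a b hn ha hb
    rw [pvGcdLoop]
    split_ifs with h
    · subst h
      simp [Int.toNat_of_nonneg ha]
    · have hbpos : 0 < b := lt_of_le_of_ne hb (Ne.symm h)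
      rw [PySem.Int.mod_eq_emod_of_pos hbpos]
      have h1 : 0 ≤ a % b := Int.emod_nonneg a (ne_of_gt hbpos)
      have h2 : a % b < b := Int.emod_lt_of_pos a hbpos
      rw [ih b (a % b) (by omega) hb h1]
      congr 1
      have e : (a % b).toNat = a.toNat % b.toNat := by
        conv_lhs => rw [← Int.toNat_of_nonneg ha, ← Int.toNat_of_nonneg hb]
        rw [← Int.natCast_mod, Int.toNat_natCast]
      rw [e]
      conv_rhs => rw [Nat.gcd_comm, Nat.gcd_rec]
      exact Nat.gcd_comm _ _

theorem cinci_multipli_comuni_spec : Claim_equal_cinci_multipli_comuni := by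
  intro x y hdom hpre
  obtain ⟨hx, hy⟩ := hpre
  unfold Spec_cinci_multipli_comuni
  have hL : 0 < (Int.lcm x y : Int) := by
    have : Int.lcm x y ≠ 0 := by
      rw [Int.lcm_def]
      exact Nat.lcm_ne_zero (Int.natAbs_ne_zero.mpr hx) (Int.natAbs_ne_zero.mpr hy)
    exact_mod_cast Nat.pos_of_ne_zero this
  have hg : pvGcdLoop |x| |y| = ((Int.gcd x y : Nat) : Int) := by
    rw [pvGcdLoop_eq_gcd (|y|).natAbs |x| |y| le_rfl (abs_nonneg x) (abs_nonneg y)]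
    have e : ∀ z : Int, |z|.toNat = z.natAbs := fun z => by
      rw [← Int.natCast_natAbs, Int.toNat_natCast]
    rw [e, e]
    rfl
  have hlcm : PySem.Int.floordiv |x * y| (pvGcdLoop |x| |y|) = (Int.lcm x y : Int) := by
    rw [hg, ← Int.natCast_natAbs, Int.natAbs_mul, Int.lcm_def]
    rw [PySem.Int.floordiv_natCast]
    rfl
  have hM : (if x > y then x else if y > x then y else x) = max x y := by
    simp only [max_def]; split_ifs <;> omega
  obtain ⟨hsd, hs2, hs3⟩ := pvS_char (Int.lcm x y : Int) (max x y) hL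
  have hLxy : (Int.lcm x y : Int) ≤ ((x * y).natAbs : Int) := by
    have hdvd : (Int.lcm x y : Int) ∣ ((x * y).natAbs : Int) := by
      rw [Int.natCast_dvd_natCast, Int.lcm_def]
      exact Nat.lcm_dvd (by rw [Int.natAbs_dvd_natAbs]; exact dvd_mul_right x y)
        (by rw [Int.natAbs_dvd_natAbs]; exact dvd_mul_left y x)
    have hpos : 0 < ((x * y).natAbs : Int) := by
      have h0 : x * y ≠ 0 := mul_ne_zero hx hy
      exact_mod_cast Int.natAbs_pos.mpr h0
    exact Int.le_of_dvd hpos hdvd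
  show pvLoopA x y [] (if x > y then x else if y > x then y else x) (5 * (x * y).natAbs + 1)
      = cinci_multipli_comuni_alt x y
  rw [hM]
  rw [pvLoopA_spec x y hx hy _ _ _ (by simp) (by
    simp only [List.length_nil, Nat.cast_zero, sub_zero]
    have h5 : pvS (Int.lcm x y : Int) (max x y) + 4 * (Int.lcm x y : Int) - max x y
        < 5 * ((x * y).natAbs : Int) := by linarith
    omega)]
  show _ = (PySem.List.pyRange 0 5 1).map
      (fun i => -(PySem.Int.floordiv (-(max x y)) (PySem.Int.floordiv |x * y| (pvGcdLoop |x| |y|)))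
          * (PySem.Int.floordiv |x * y| (pvGcdLoop |x| |y|))
        + i * (PySem.Int.floordiv |x * y| (pvGcdLoop |x| |y|)))
  rw [hlcm]
  have hr : PySem.List.pyRange 0 5 1 = [0, 1, 2, 3, 4] := by decide
  have hr' : List.range (5 - ([] : List Int).length) = [0, 1, 2, 3, 4] := by decide
  rw [hr, hr', List.nil_append]
  simp only [List.map_cons, List.map_nil, pvS]
  norm_num
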